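-- pv_equiv track=rewrite | github.com/oss-materijali/vjezbe | SRC103-UUP/II.Kolokvij/warmup/09_vj2kol.py | function
-- ===== SOURCE A (Python) =====
-- def function(string_a, a, b):
--     SAMOGLASNICI = "aeiou"
--     counter_a = 0
--     counter_b = 0
--
--     string_a = string_a.lower()
--
--     for c in string_a:
--         if c in SAMOGLASNICI:
--             counter_a += 1
--         elif c in " ,.":
--             pass
--         else:
--             counter_b += 1
--
--     return counter_a == a and counter_b == b
-- ===== SOURCE B (Python) =====
-- def function(string_a, a, b):
--     s = string_a.lower()
--     counts = {}
--     for c in s: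
--         counts[c] = counts.get(c, 0) + 1
--     vowels = sum(counts.get(v, 0) for v in "aeiou")
--     seps = sum(counts.get(c, 0) for c in " ,.")
--     return vowels == a and len(string_a) - vowels - seps == b
-- ===== Notes on version B (the rewrite author's own statement) =====
-- stated objective: alternative
-- what changed: Replaces the per-character if/elif/else dual-accumulator loop by a tally-then-aggregate shape: build a character frequency dictionary in one pass, then derive the vowel count by summing the five vowel entries and the consonant count as len - vowels - separators.
import Mathlib
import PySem

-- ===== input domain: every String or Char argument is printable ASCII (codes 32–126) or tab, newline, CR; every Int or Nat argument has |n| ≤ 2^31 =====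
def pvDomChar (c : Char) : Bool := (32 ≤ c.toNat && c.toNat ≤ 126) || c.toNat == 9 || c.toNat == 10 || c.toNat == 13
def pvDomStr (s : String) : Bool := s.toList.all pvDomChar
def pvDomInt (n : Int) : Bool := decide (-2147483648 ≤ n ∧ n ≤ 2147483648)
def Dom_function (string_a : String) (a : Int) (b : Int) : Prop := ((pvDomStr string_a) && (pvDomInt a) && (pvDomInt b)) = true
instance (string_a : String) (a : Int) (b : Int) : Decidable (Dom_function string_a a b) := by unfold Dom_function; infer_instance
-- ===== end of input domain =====

-- B replaces A's per-character if/elif/else dual-accumulator loop by a frequency-dictionary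
-- tally followed by aggregation (consonants = len - vowels - separators); alternative, not faster.

-- ===== PORT A =====
def function (string_a : String) (a : Int) (b : Int) : Bool :=
  let s := (PySem.Str.lower string_a).toList
  let p := s.foldl (fun (p : Int × Int) c =>
      if c ∈ "aeiou".toList then (p.1 + 1, p.2)
      else if c ∈ " ,.".toList then p
      else (p.1, p.2 + 1)) (0, 0)
  p.1 == a && p.2 == b

-- ===== PORT B =====
def function_alt (string_a : String) (a : Int) (b : Int) : Bool :=
  let s := (PySem.Str.lower string_a).toList
  let counts := s.foldl (fun (d : PySem.Dict Char Int) c => d.insert c (d.getD c 0 + 1)) PySem.Dict.empty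
  let vowels := ("aeiou".toList.map (fun v => counts.getD v 0)).sum
  let seps := (" ,.".toList.map (fun v => counts.getD v 0)).sum
  vowels == a && ((PySem.Str.len string_a : Int) - vowels - seps) == b

-- ===== PRECONDITION & SPEC =====
def Spec_function (string_a : String) (a : Int) (b : Int) (out : Bool) : Prop := out = function_alt string_a a b
instance (string_a : String) (a : Int) (b : Int) (out : Bool) : Decidable (Spec_function string_a a b out) := by unfold Spec_function; infer_instance

-- ===== CLAIM (what is proved, stated in full; the proofs are below) =====
def Claim_equal_function : Prop := ∀ (string_a : String) (a : Int) (b : Int), Dom_function string_a a b → Spec_function string_a a b (function string_a a b)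

-- ===== LEMMAS AND PROOFS =====

-- A's loop computes (vowel count, other count) of the traversed list.
theorem function_foldA (s : List Char) (x y : Int) :
    s.foldl (fun (p : Int × Int) c =>
      if c ∈ "aeiou".toList then (p.1 + 1, p.2)
      else if c ∈ " ,.".toList then p
      else (p.1, p.2 + 1)) (x, y)
    = (x + (s.countP (· ∈ "aeiou".toList) : Int),
       y + (s.countP (fun c => c ∉ "aeiou".toList ∧ c ∉ " ,.".toList) : Int)) := by
  induction s generalizing x y with
  | nil => simp
  | cons c s ih =>
    by_cases h1 : c ∈ "aeiou".toList
    · simp only [List.foldl_cons, if_pos h1, ih, List.countP_cons, Prod.mk.injEq,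
        decide_eq_true_eq]
      rw [if_neg (by tauto : ¬ (c ∉ "aeiou".toList ∧ c ∉ " ,.".toList))]
      constructor <;> (push_cast; ring)
    · by_cases h2 : c ∈ " ,.".toList
      · simp only [List.foldl_cons, if_neg h1, if_pos h2, ih, List.countP_cons, Prod.mk.injEq,
          decide_eq_true_eq]
        rw [if_neg (by tauto : ¬ (c ∉ "aeiou".toList ∧ c ∉ " ,.".toList))]
        constructor <;> (push_cast; ring)
      · simp only [List.foldl_cons, if_neg h1, if_neg h2, ih, List.countP_cons, Prod.mk.injEq,
          decide_eq_true_eq]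
        rw [if_pos ⟨h1, h2⟩]
        constructor <;> (push_cast; ring)

-- for c in the nodup list vs, exactly one indicator term is 1
theorem sum_indicator_one (vs : List Char) (c : Char) (hvs : vs.Nodup) (hc : c ∈ vs) :
    (vs.map (fun v => ((if c = v then 1 else 0) : Int))).sum = 1 := by
  induction vs with
  | nil => cases hc
  | cons v vs ih =>
    rcases List.mem_cons.mp hc with h | h
    · subst h
      have hall : ∀ w ∈ vs, c ≠ w := fun w hw he => (List.nodup_cons.mp hvs).1 (he ▸ hw)
      simp only [List.map_cons, List.sum_cons]
      have hmap : vs.map (fun v => ((if c = v then 1 else 0) : Int)) = vs.map (fun _ => (0 : Int)) := by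
        apply List.map_congr_left; intro w hw
        simp [hall w hw]
      simp [hmap]
    · have hne : c ≠ v := fun he => (List.nodup_cons.mp hvs).1 (he ▸ h)
      simp only [List.map_cons, List.sum_cons, if_neg hne]
      rw [ih (List.nodup_cons.mp hvs).2 h]; ring

-- summing the counts of a list of distinct characters = countP of membership
theorem sum_counts_eq_countP (vs : List Char) (hvs : vs.Nodup) (s : List Char) :
    (vs.map (fun v => (s.count v : Int))).sum = (s.countP (· ∈ vs) : Int) := by
  induction s with
  | nil => simp
  | cons c s ih =>
    rw [List.countP_cons]
    by_cases hc : c ∈ vs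
    · have h1 : vs.map (fun v => (((c :: s).count v : Nat) : Int))
          = vs.map (fun v => (s.count v : Int) + (if c = v then 1 else 0)) := by
        apply List.map_congr_left; intro v _
        by_cases hv : c = v <;> simp [hv]
      have h2 : (vs.map (fun v => (s.count v : Int) + (if c = v then 1 else 0))).sum
          = (vs.map (fun v => (s.count v : Int))).sum
            + (vs.map (fun v => ((if c = v then 1 else 0) : Int))).sum := by
        simp [← List.sum_map_add]
      rw [h1, h2, sum_indicator_one vs c hvs hc, ih]
      simp [hc]
    · have h1 : vs.map (fun v => (((c :: s).count v : Nat) : Int))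
          = vs.map (fun v => (s.count v : Int)) := by
        apply List.map_congr_left; intro v hv
        have : c ≠ v := fun h => hc (h ▸ hv)
        simp [this]
      rw [h1, ih]
      simp [hc]

-- every character is a vowel, a separator, or counted as "other"
theorem countP_split (s : List Char) :
    s.countP (· ∈ "aeiou".toList) + s.countP (· ∈ " ,.".toList)
      + s.countP (fun c => c ∉ "aeiou".toList ∧ c ∉ " ,.".toList) = s.length := by
  induction s with
  | nil => simp
  | cons c s ih =>
    simp only [List.countP_cons, List.length_cons, decide_eq_true_eq]
    by_cases h1 : c ∈ "aeiou".toList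
    · have h2 : c ∉ " ,.".toList := by
        have hv : "aeiou".toList = ['a','e','i','o','u'] := rfl
        rw [hv] at h1
        simp at h1
        rcases h1 with rfl|rfl|rfl|rfl|rfl <;> decide
      rw [if_pos h1, if_neg h2, if_neg (by tauto : ¬ (c ∉ "aeiou".toList ∧ c ∉ " ,.".toList))]
      omega
    · by_cases h2 : c ∈ " ,.".toList
      · rw [if_neg h1, if_pos h2, if_neg (by tauto : ¬ (c ∉ "aeiou".toList ∧ c ∉ " ,.".toList))]
        omega
      · rw [if_neg h1, if_neg h2, if_pos ⟨h1, h2⟩]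
        omega

-- lower preserves length
theorem length_lower (s : String) :
    (PySem.Str.lower s).toList.length = s.toList.length := by
  simp [PySem.Str.toList_lower, PySem.Chars.lower]

-- ===== VERDICT (by name: the statement is the Claim_ definition above) =====
theorem function_spec : Claim_equal_function := by
  intro string_a a b _
  simp only [Spec_function, function, function_alt]
  rw [function_foldA]
  have hget : ∀ v : Char,
      ((((PySem.Str.lower string_a).toList).foldl
        (fun (d : PySem.Dict Char Int) c => d.insert c (d.getD c 0 + 1)) PySem.Dict.empty).getD v 0)
      = (((PySem.Str.lower string_a).toList).count v : Int) := by
    intro v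
    rw [PySem.Dict.getD_foldl_insert_add_one]
    simp [PySem.Dict.empty, PySem.Dict.getD, PySem.Dict.get?]
  simp only [hget]
  rw [sum_counts_eq_countP _ (by decide), sum_counts_eq_countP _ (by decide)]
  have hs := countP_split (PySem.Str.lower string_a).toList
  have hl : PySem.Str.len string_a = string_a.toList.length := by
    simp [PySem.Str.len]
  have e1 : "aeiou".toList = ['a','e','i','o','u'] := rfl
  have e2 : " ,.".toList = [' ', ',', '.'] := rfl
  simp only [e1, e2] at hs ⊢
  have hlen : (PySem.Str.len string_a : Int)
      - (((PySem.Str.lower string_a).toList).countP (· ∈ ['a','e','i','o','u']) : Int)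
      - (((PySem.Str.lower string_a).toList).countP (· ∈ [' ', ',', '.']) : Int)
      = 0 + (((PySem.Str.lower string_a).toList).countP
          (fun c => c ∉ ['a','e','i','o','u'] ∧ c ∉ [' ', ',', '.']) : Int) := by
    rw [hl, ← length_lower string_a]
    omega
  rw [hlen]
  simp
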